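-- pv_equiv track=rewrite | github.com/FunkeyMonk/CS-3310-Project-1 | main.py | combine_quadrants
-- ===== SOURCE A (Python) =====
-- def combine_quadrants(C11, C12, C21, C22):
--     # assuming submatrices are the same size
--     mid = len(C11)
--     n = 2 * mid
--
--     C = [[0 for _ in range(n)] for _ in range(n)]
--
--     # C11
--     for i in range(mid):
--         for j in range(mid):
--             C[i][j] = C11[i][j]
--
--     # C12
--     for i in range(mid):
--         for j in range(mid):
--             C[i][j + mid] = C12[i][j]
--
--     # C21
--     for i in range(mid):
--         for j in range(mid):
--             C[i + mid][j] = C21[i][j]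
--
--     # C22
--     for i in range(mid):
--         for j in range(mid):
--             C[i + mid][j + mid] = C22[i][j]
--
--     return C
-- ===== SOURCE B (Python) =====
-- def combine_quadrants(C11, C12, C21, C22):
--     mid = len(C11)
--     top = [C11[i][:mid] + C12[i][:mid] for i in range(mid)]
--     bottom = [C21[i][:mid] + C22[i][:mid] for i in range(mid)]
--     return top + bottom
-- ===== Notes on version B (the rewrite author's own statement) =====
-- stated objective: simpler
-- what changed: B builds the result directly as row concatenations (top rows C11[i][:mid]+C12[i][:mid], bottom rows C21[i][:mid]+C22[i][:mid]) instead of preallocating a 2n x 2n zero matrix and copying every element through four nested element-wise double loops.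
import Mathlib
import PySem

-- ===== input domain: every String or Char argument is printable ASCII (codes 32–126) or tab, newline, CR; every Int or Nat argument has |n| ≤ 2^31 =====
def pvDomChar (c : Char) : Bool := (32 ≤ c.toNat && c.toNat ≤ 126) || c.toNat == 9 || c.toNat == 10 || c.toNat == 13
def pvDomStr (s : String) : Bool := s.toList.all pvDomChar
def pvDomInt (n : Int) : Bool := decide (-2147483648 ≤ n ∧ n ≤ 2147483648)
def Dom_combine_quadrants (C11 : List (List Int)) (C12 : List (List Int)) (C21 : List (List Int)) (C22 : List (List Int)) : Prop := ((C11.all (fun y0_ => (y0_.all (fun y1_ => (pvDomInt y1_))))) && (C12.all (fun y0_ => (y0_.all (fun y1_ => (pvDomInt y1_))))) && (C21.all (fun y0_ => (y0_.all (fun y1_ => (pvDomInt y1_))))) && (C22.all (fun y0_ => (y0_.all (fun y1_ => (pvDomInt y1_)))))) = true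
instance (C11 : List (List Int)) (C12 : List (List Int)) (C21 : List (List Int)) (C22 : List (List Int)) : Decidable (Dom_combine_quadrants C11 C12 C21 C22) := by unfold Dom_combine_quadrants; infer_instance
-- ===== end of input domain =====

-- B builds the combined matrix directly as row concatenations (each used row sliced to mid
-- entries, the number A copies) instead of preallocating a zero matrix and copying
-- element-by-element through four nested double loops (objective: simpler).

-- ===== PORT A =====
-- Python's inner loop `for j in range(cols): C[i][j+coff] = q[j]` mutates row C[i] in place:
-- ported as a fold of List.set over the row, written back with List.set.  Reads q[j] use
-- getD 0; Pre_ guarantees the index is in range, where getD is exact (Python raises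
-- IndexError outside Pre_).
def pvFillRow (row : List Int) (q : List Int) (coff cols : Nat) : List Int :=
  (List.range cols).foldl (fun r j => r.set (j + coff) (q.getD j 0)) row

-- one `for i in range(rows): for j in range(cols): C[i+roff][j+coff] = Q[i][j]` block of A
def pvFillBlock (C : List (List Int)) (Q : List (List Int)) (roff coff rows cols : Nat) : List (List Int) :=
  (List.range rows).foldl
    (fun C i => C.set (i + roff) (pvFillRow (C.getD (i + roff) []) (Q.getD i []) coff cols)) C

def combine_quadrants (C11 : List (List Int)) (C12 : List (List Int)) (C21 : List (List Int)) (C22 : List (List Int)) : List (List Int) :=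
  let mid := C11.length
  let n := 2 * mid
  let C := List.replicate n (List.replicate n (0 : Int))
  let C := pvFillBlock C C11 0 0 mid mid
  let C := pvFillBlock C C12 0 mid mid mid
  let C := pvFillBlock C C21 mid 0 mid mid
  pvFillBlock C C22 mid mid mid mid

-- ===== PORT B =====
-- Source B's slice row[:mid] with 0 ≤ mid is exactly List.take mid
def combine_quadrants_alt (C11 : List (List Int)) (C12 : List (List Int)) (C21 : List (List Int)) (C22 : List (List Int)) : List (List Int) :=
  let mid := C11.length
  let top := (List.range mid).map (fun i => (C11.getD i []).take mid ++ (C12.getD i []).take mid)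
  let bottom := (List.range mid).map (fun i => (C21.getD i []).take mid ++ (C22.getD i []).take mid)
  top ++ bottom

-- ===== PRECONDITION & SPEC =====
-- Pre_ excludes exactly the inputs where A raises IndexError: a quadrant with fewer than
-- mid = len(C11) rows, or a used row (row index < mid) with fewer than mid entries.
def Pre_combine_quadrants (C11 : List (List Int)) (C12 : List (List Int)) (C21 : List (List Int)) (C22 : List (List Int)) : Prop :=
  C11.length ≤ C12.length ∧ C11.length ≤ C21.length ∧ C11.length ≤ C22.length ∧
  ∀ i < C11.length,
    C11.length ≤ (C11.getD i []).length ∧ C11.length ≤ (C12.getD i []).length ∧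
    C11.length ≤ (C21.getD i []).length ∧ C11.length ≤ (C22.getD i []).length

instance (C11 : List (List Int)) (C12 : List (List Int)) (C21 : List (List Int)) (C22 : List (List Int)) : Decidable (Pre_combine_quadrants C11 C12 C21 C22) := by
  unfold Pre_combine_quadrants; infer_instance

def pvWitness_combine_quadrants : List (List Int) × List (List Int) × List (List Int) × List (List Int) :=
  ([[1]], [[2]], [[3]], [[4]])

def Spec_combine_quadrants (C11 : List (List Int)) (C12 : List (List Int)) (C21 : List (List Int)) (C22 : List (List Int)) (out : List (List Int)) : Prop :=
  out = combine_quadrants_alt C11 C12 C21 C22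

instance (C11 : List (List Int)) (C12 : List (List Int)) (C21 : List (List Int)) (C22 : List (List Int)) (out : List (List Int)) : Decidable (Spec_combine_quadrants C11 C12 C21 C22 out) := by
  unfold Spec_combine_quadrants; infer_instance

-- ===== CLAIM (what is proved, stated in full; the proofs are below) =====
def Claim_equal_combine_quadrants : Prop := ∀ (C11 : List (List Int)) (C12 : List (List Int)) (C21 : List (List Int)) (C22 : List (List Int)), Dom_combine_quadrants C11 C12 C21 C22 → Pre_combine_quadrants C11 C12 C21 C22 → Spec_combine_quadrants C11 C12 C21 C22 (combine_quadrants C11 C12 C21 C22)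

-- ===== LEMMAS AND PROOFS =====

theorem pvFillRow_succ (row q : List Int) (coff cols : Nat) :
    pvFillRow row q coff (cols + 1) =
      (pvFillRow row q coff cols).set (cols + coff) (q.getD cols 0) := by
  simp [pvFillRow, List.range_succ]

theorem pvFillRow_length (q : List Int) (coff : Nat) :
    ∀ (cols : Nat) (row : List Int), (pvFillRow row q coff cols).length = row.length := by
  intro cols
  induction cols with
  | zero => intro row; rfl
  | succ n ih => intro row; rw [pvFillRow_succ, List.length_set]; exact ih row

theorem pvFillRow_getElem? (q : List Int) (coff : Nat) :
    ∀ (cols : Nat) (row : List Int), coff + cols ≤ row.length →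
      ∀ c : Nat, (pvFillRow row q coff cols)[c]? =
        if coff ≤ c ∧ c < coff + cols then some (q.getD (c - coff) 0) else row[c]? := by
  intro cols
  induction cols with
  | zero => intro row h c; rw [if_neg (by omega)]; rfl
  | succ n ih =>
    intro row h c
    have hlen : (pvFillRow row q coff n).length = row.length := pvFillRow_length q coff n row
    rw [pvFillRow_succ, List.getElem?_set]
    by_cases hc : n + coff = c
    · rw [if_pos hc, if_pos (by rw [hlen]; omega), if_pos (by omega)]
      have hcc : c - coff = n := by omega
      rw [hcc]
    · rw [if_neg hc, ih row (by omega) c]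
      split_ifs <;> first | rfl | omega

theorem pvFillBlock_succ (C Q : List (List Int)) (roff coff rows cols : Nat) :
    pvFillBlock C Q roff coff (rows + 1) cols =
      (pvFillBlock C Q roff coff rows cols).set (rows + roff)
        (pvFillRow ((pvFillBlock C Q roff coff rows cols).getD (rows + roff) [])
          (Q.getD rows []) coff cols) := by
  simp [pvFillBlock, List.range_succ]

theorem pvFillBlock_length (Q : List (List Int)) (roff coff cols : Nat) :
    ∀ (rows : Nat) (C : List (List Int)),
      (pvFillBlock C Q roff coff rows cols).length = C.length := by
  intro rows
  induction rows with
  | zero => intro C; rfl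
  | succ n ih => intro C; rw [pvFillBlock_succ, List.length_set]; exact ih C

theorem pvFillBlock_getElem? (Q : List (List Int)) (roff coff cols : Nat) :
    ∀ (rows : Nat) (C : List (List Int)), roff + rows ≤ C.length →
      ∀ r : Nat, (pvFillBlock C Q roff coff rows cols)[r]? =
        if roff ≤ r ∧ r < roff + rows then
          some (pvFillRow (C.getD r []) (Q.getD (r - roff) []) coff cols)
        else C[r]? := by
  intro rows
  induction rows with
  | zero => intro C h r; rw [if_neg (by omega)]; rfl
  | succ n ih =>
    intro C h r
    have h' : roff + n ≤ C.length := by omega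
    have hlen := pvFillBlock_length Q roff coff cols n C
    have hrow : (pvFillBlock C Q roff coff n cols).getD (n + roff) [] = C.getD (n + roff) [] := by
      rw [List.getD_eq_getElem?_getD, List.getD_eq_getElem?_getD, ih C h' (n + roff),
        if_neg (by omega)]
    rw [pvFillBlock_succ, hrow, List.getElem?_set]
    by_cases hc : n + roff = r
    · rw [if_pos hc, if_pos (by rw [hlen]; omega), if_pos (by omega)]
      subst hc
      rw [show n + roff - roff = n from by omega]
    · rw [if_neg hc, ih C h' r]
      split_ifs <;> first | rfl | omega

theorem pvFillRow_pair (mid : Nat) (a b : List Int) (ha : mid ≤ a.length) (hb : mid ≤ b.length) :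
    pvFillRow (pvFillRow (List.replicate (2 * mid) (0 : Int)) a 0 mid) b mid mid =
      a.take mid ++ b.take mid := by
  apply List.ext_getElem?
  intro c
  have h1 : (List.replicate (2 * mid) (0 : Int)).length = 2 * mid := List.length_replicate
  have h2 : (pvFillRow (List.replicate (2 * mid) (0 : Int)) a 0 mid).length = 2 * mid := by
    rw [pvFillRow_length]; exact h1
  have hta : (a.take mid).length = mid := by rw [List.length_take]; omega
  have htb : (b.take mid).length = mid := by rw [List.length_take]; omega
  rw [pvFillRow_getElem? b mid mid _ (by rw [h2]; omega) c]
  by_cases hc1 : mid ≤ c ∧ c < mid + mid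
  · rw [if_pos hc1, List.getElem?_append, if_neg (by omega : ¬ c < (a.take mid).length), hta,
      List.getElem?_take_of_lt (by omega : c - mid < mid),
      List.getElem?_eq_getElem (show c - mid < b.length by omega),
      List.getD_eq_getElem b 0 (show c - mid < b.length by omega)]
  · rw [if_neg hc1, pvFillRow_getElem? a 0 mid _ (by rw [h1]; omega) c]
    by_cases hc2 : c < mid
    · rw [if_pos ⟨Nat.zero_le c, by omega⟩, List.getElem?_append,
        if_pos (show c < (a.take mid).length by omega), Nat.sub_zero,
        List.getElem?_take_of_lt hc2,
        List.getElem?_eq_getElem (show c < a.length by omega),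
        List.getD_eq_getElem a 0 (show c < a.length by omega)]
    · rw [if_neg (by omega), List.getElem?_eq_none (by rw [h1]; omega),
        List.getElem?_eq_none (by rw [List.length_append, hta, htb]; omega)]

theorem pvQuad_getElem? (L : Nat) (A B C D : List (List Int)) (r : Nat) :
    (pvFillBlock (pvFillBlock (pvFillBlock (pvFillBlock
        (List.replicate (2 * L) (List.replicate (2 * L) (0 : Int))) A 0 0 L L)
        B 0 L L L) C L 0 L L) D L L L L)[r]? =
      if r < L then
        some (pvFillRow (pvFillRow (List.replicate (2 * L) (0 : Int)) (A.getD r []) 0 L)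
          (B.getD r []) L L)
      else if r < 2 * L then
        some (pvFillRow (pvFillRow (List.replicate (2 * L) (0 : Int)) (C.getD (r - L) []) 0 L)
          (D.getD (r - L) []) L L)
      else none := by
  set C0 := List.replicate (2 * L) (List.replicate (2 * L) (0 : Int)) with hC0
  have l0 : C0.length = 2 * L := by rw [hC0, List.length_replicate]
  set M1 := pvFillBlock C0 A 0 0 L L with hM1
  have l1 : M1.length = 2 * L := by rw [hM1, pvFillBlock_length]; exact l0
  set M2 := pvFillBlock M1 B 0 L L L with hM2
  have l2 : M2.length = 2 * L := by rw [hM2, pvFillBlock_length]; exact l1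
  set M3 := pvFillBlock M2 C L 0 L L with hM3
  have l3 : M3.length = 2 * L := by rw [hM3, pvFillBlock_length]; exact l2
  rw [pvFillBlock_getElem? D L L L L M3 (by rw [l3]; omega) r]
  by_cases hr1 : r < L
  · rw [if_neg (by omega), hM3, pvFillBlock_getElem? C L 0 L L M2 (by rw [l2]; omega) r,
      if_neg (by omega), hM2, pvFillBlock_getElem? B 0 L L L M1 (by rw [l1]; omega) r,
      if_pos ⟨Nat.zero_le r, by omega⟩, if_pos hr1]
    have hM1r : M1.getD r [] =
        pvFillRow (List.replicate (2 * L) (0 : Int)) (A.getD r []) 0 L := by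
      rw [List.getD_eq_getElem?_getD, hM1,
        pvFillBlock_getElem? A 0 0 L L C0 (by rw [l0]; omega) r,
        if_pos ⟨Nat.zero_le r, by omega⟩, Option.getD_some]
      have hc0r : C0.getD r [] = List.replicate (2 * L) (0 : Int) := by
        rw [List.getD_eq_getElem?_getD, hC0, List.getElem?_replicate, if_pos (by omega),
          Option.getD_some]
      rw [hc0r, Nat.sub_zero]
    rw [hM1r, Nat.sub_zero]
  · by_cases hr2 : r < 2 * L
    · rw [if_pos ⟨by omega, by omega⟩, if_neg hr1, if_pos hr2]
      have hM2r : M2.getD r [] = List.replicate (2 * L) (0 : Int) := by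
        rw [List.getD_eq_getElem?_getD, hM2,
          pvFillBlock_getElem? B 0 L L L M1 (by rw [l1]; omega) r, if_neg (by omega), hM1,
          pvFillBlock_getElem? A 0 0 L L C0 (by rw [l0]; omega) r, if_neg (by omega), hC0,
          List.getElem?_replicate, if_pos (by omega), Option.getD_some]
      have hM3r : M3.getD r [] =
          pvFillRow (List.replicate (2 * L) (0 : Int)) (C.getD (r - L) []) 0 L := by
        rw [List.getD_eq_getElem?_getD, hM3,
          pvFillBlock_getElem? C L 0 L L M2 (by rw [l2]; omega) r,
          if_pos ⟨by omega, by omega⟩, Option.getD_some, hM2r]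
      rw [hM3r]
    · rw [if_neg (by omega), if_neg hr1, if_neg hr2, hM3,
        pvFillBlock_getElem? C L 0 L L M2 (by rw [l2]; omega) r, if_neg (by omega), hM2,
        pvFillBlock_getElem? B 0 L L L M1 (by rw [l1]; omega) r, if_neg (by omega), hM1,
        pvFillBlock_getElem? A 0 0 L L C0 (by rw [l0]; omega) r, if_neg (by omega)]
      exact List.getElem?_eq_none (by rw [l0]; omega)

theorem combine_quadrants_getElem? (C11 C12 C21 C22 : List (List Int)) (r : Nat) :
    (combine_quadrants C11 C12 C21 C22)[r]? =
      if r < C11.length then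
        some (pvFillRow (pvFillRow (List.replicate (2 * C11.length) (0 : Int))
          (C11.getD r []) 0 C11.length) (C12.getD r []) C11.length C11.length)
      else if r < 2 * C11.length then
        some (pvFillRow (pvFillRow (List.replicate (2 * C11.length) (0 : Int))
          (C21.getD (r - C11.length) []) 0 C11.length)
          (C22.getD (r - C11.length) []) C11.length C11.length)
      else none :=
  pvQuad_getElem? C11.length C11 C12 C21 C22 r

theorem combine_quadrants_alt_getElem? (C11 C12 C21 C22 : List (List Int)) (r : Nat) :
    (combine_quadrants_alt C11 C12 C21 C22)[r]? =
      if r < C11.length then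
        some ((C11.getD r []).take C11.length ++ (C12.getD r []).take C11.length)
      else if r < 2 * C11.length then
        some ((C21.getD (r - C11.length) []).take C11.length ++
          (C22.getD (r - C11.length) []).take C11.length)
      else none := by
  show ((List.range C11.length).map
      (fun i => (C11.getD i []).take C11.length ++ (C12.getD i []).take C11.length) ++
    (List.range C11.length).map
      (fun i => (C21.getD i []).take C11.length ++ (C22.getD i []).take C11.length))[r]? = _
  rw [List.getElem?_append]
  by_cases hr1 : r < C11.length
  · rw [if_pos (by rw [List.length_map, List.length_range]; omega), List.getElem?_map,
      List.getElem?_range hr1, if_pos hr1, Option.map_some]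
  · rw [if_neg (by rw [List.length_map, List.length_range]; omega), if_neg hr1,
      List.length_map, List.length_range]
    by_cases hr2 : r < 2 * C11.length
    · rw [if_pos hr2, List.getElem?_map, List.getElem?_range (by omega), Option.map_some]
    · rw [if_neg hr2]
      rw [List.getElem?_eq_none (by rw [List.length_map, List.length_range]; omega)]

-- ===== VERDICT (by name: the statement is the Claim_ definition above) =====
theorem combine_quadrants_spec : Claim_equal_combine_quadrants := by
  intro C11 C12 C21 C22 _ hPre
  obtain ⟨_, _, _, hrows⟩ := hPre
  apply List.ext_getElem?
  intro r
  rw [combine_quadrants_getElem?, combine_quadrants_alt_getElem?]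
  split_ifs with hr1 hr2
  · obtain ⟨h11, h12, _, _⟩ := hrows r hr1
    exact congrArg some (pvFillRow_pair C11.length (C11.getD r []) (C12.getD r []) h11 h12)
  · have hi : r - C11.length < C11.length := by omega
    obtain ⟨_, _, h21, h22⟩ := hrows _ hi
    exact congrArg some
      (pvFillRow_pair C11.length (C21.getD (r - C11.length) [])
        (C22.getD (r - C11.length) []) h21 h22)
  · rfl
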